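-- pv_equiv track=rewrite | github.com/MbuguaOwen/cot_positioning_dashboard | cot_bias/sources.py | _disagg_schema
-- ===== SOURCE A (Python) =====
-- def _disagg_schema(ncols: int) -> list[str]:
--     """Minimal schema (first ~25 columns) for c_disagg.txt when file has no header row."""
--     cols = [f"col_{i:03d}" for i in range(1, ncols + 1)]
--     # Column order is per the CFTC "Variable Names" list for Disaggregated combined.
--     mapping = {
--         0: "Market_and_Exchange_Names",
--         1: "As_of_Date_In_Form_YYMMDD",
--         2: "As_of_Date_Form_YYYY-MM-DD",
--         3: "CFTC_Contract_Market_Code",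
--         4: "CFTC_Market_Code",
--         5: "CFTC_Region_Code",
--         6: "CFTC_Commodity_Code",
--         7: "Open_Interest_All",
--         8: "Prod_Merc_Positions_Long_All",
--         9: "Prod_Merc_Positions_Short_All",
--         10: "Swap_Positions_Long_All",
--         11: "Swap_Positions_Short_All",
--         12: "Swap_Positions_Spread_All",
--         13: "M_Money_Positions_Long_All",
--         14: "M_Money_Positions_Short_All",
--         15: "M_Money_Positions_Spread_All",
--         16: "Other_Rept_Positions_Long_All",
--         17: "Other_Rept_Positions_Short_All",
--         18: "Other_Rept_Positions_Spread_All",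
--         19: "Tot_Rept_Positions_Long_All",
--         20: "Tot_Rept_Positions_Short_All",
--         21: "NonRept_Positions_Long_All",
--         22: "NonRept_Positions_Short_All",
--     }
--     for idx, name in mapping.items():
--         if idx < ncols:
--             cols[idx] = name
--     return cols
-- ===== SOURCE B (Python) =====
-- _NAMES = [
--     "Market_and_Exchange_Names",
--     "As_of_Date_In_Form_YYMMDD",
--     "As_of_Date_Form_YYYY-MM-DD",
--     "CFTC_Contract_Market_Code",
--     "CFTC_Market_Code",
--     "CFTC_Region_Code",
--     "CFTC_Commodity_Code",
--     "Open_Interest_All",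
--     "Prod_Merc_Positions_Long_All",
--     "Prod_Merc_Positions_Short_All",
--     "Swap_Positions_Long_All",
--     "Swap_Positions_Short_All",
--     "Swap_Positions_Spread_All",
--     "M_Money_Positions_Long_All",
--     "M_Money_Positions_Short_All",
--     "M_Money_Positions_Spread_All",
--     "Other_Rept_Positions_Long_All",
--     "Other_Rept_Positions_Short_All",
--     "Other_Rept_Positions_Spread_All",
--     "Tot_Rept_Positions_Long_All",
--     "Tot_Rept_Positions_Short_All",
--     "NonRept_Positions_Long_All",
--     "NonRept_Positions_Short_All",
-- ]
--
--
-- def _disagg_schema(ncols: int) -> list[str]: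
--     """Minimal schema (first ~25 columns) for c_disagg.txt when file has no header row."""
--     cols = _NAMES[:ncols] if ncols >= 0 else []
--     cols.extend(f"col_{i:03d}" for i in range(len(_NAMES) + 1, ncols + 1))
--     return cols
-- ===== Notes on version B (the rewrite author's own statement) =====
-- stated objective: simpler
-- what changed: Replaces the allocate-then-overwrite pass (build generic names for all columns, then patch the first 23 via a dict loop) with a direct construction: slice the fixed ordered name list to ncols and append the remaining generic col_NNN names.
import Mathlib
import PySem

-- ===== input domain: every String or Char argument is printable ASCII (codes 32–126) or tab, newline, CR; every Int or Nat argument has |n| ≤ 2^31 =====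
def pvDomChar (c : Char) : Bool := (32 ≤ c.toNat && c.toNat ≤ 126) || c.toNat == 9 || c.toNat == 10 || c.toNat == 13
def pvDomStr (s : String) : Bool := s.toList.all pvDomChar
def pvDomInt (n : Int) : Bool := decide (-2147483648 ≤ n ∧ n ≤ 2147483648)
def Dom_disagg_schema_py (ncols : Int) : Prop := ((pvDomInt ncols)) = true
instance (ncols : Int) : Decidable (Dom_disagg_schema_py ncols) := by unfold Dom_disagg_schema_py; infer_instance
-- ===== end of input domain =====

-- B builds the schema by slicing a fixed ordered name list and appending the generic names,
-- instead of A's allocate-generic-then-overwrite dict pass; objective: simpler.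

-- f"col_{i:03d}": exact for i ≥ 0 (both programs only apply it to i ≥ 1)
def pvFmt3 (i : Int) : String :=
  let s := PySem.Int.toStr i
  String.ofList (List.replicate (3 - s.toList.length) '0' ++ s.toList)

-- ===== PORT A =====
def disagg_schema_py (ncols : Int) : List String :=
  let cols := (PySem.List.pyRange 1 (ncols + 1) 1).map (fun i => "col_" ++ pvFmt3 i)
  let mapping : List (Int × String) :=
    [(0, "Market_and_Exchange_Names"),
     (1, "As_of_Date_In_Form_YYMMDD"),
     (2, "As_of_Date_Form_YYYY-MM-DD"),
     (3, "CFTC_Contract_Market_Code"),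
     (4, "CFTC_Market_Code"),
     (5, "CFTC_Region_Code"),
     (6, "CFTC_Commodity_Code"),
     (7, "Open_Interest_All"),
     (8, "Prod_Merc_Positions_Long_All"),
     (9, "Prod_Merc_Positions_Short_All"),
     (10, "Swap_Positions_Long_All"),
     (11, "Swap_Positions_Short_All"),
     (12, "Swap_Positions_Spread_All"),
     (13, "M_Money_Positions_Long_All"),
     (14, "M_Money_Positions_Short_All"),
     (15, "M_Money_Positions_Spread_All"),
     (16, "Other_Rept_Positions_Long_All"),
     (17, "Other_Rept_Positions_Short_All"),
     (18, "Other_Rept_Positions_Spread_All"),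
     (19, "Tot_Rept_Positions_Long_All"),
     (20, "Tot_Rept_Positions_Short_All"),
     (21, "NonRept_Positions_Long_All"),
     (22, "NonRept_Positions_Short_All")]
  -- cols[idx] = name: idx < ncols guarantees 0 ≤ idx < len(cols), so List.set is exact here
  mapping.foldl (fun cs p => if p.1 < ncols then cs.set p.1.toNat p.2 else cs) cols

-- ===== PORT B =====
def pvNames : List String :=
  ["Market_and_Exchange_Names",
   "As_of_Date_In_Form_YYMMDD",
   "As_of_Date_Form_YYYY-MM-DD",
   "CFTC_Contract_Market_Code",
   "CFTC_Market_Code",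
   "CFTC_Region_Code",
   "CFTC_Commodity_Code",
   "Open_Interest_All",
   "Prod_Merc_Positions_Long_All",
   "Prod_Merc_Positions_Short_All",
   "Swap_Positions_Long_All",
   "Swap_Positions_Short_All",
   "Swap_Positions_Spread_All",
   "M_Money_Positions_Long_All",
   "M_Money_Positions_Short_All",
   "M_Money_Positions_Spread_All",
   "Other_Rept_Positions_Long_All",
   "Other_Rept_Positions_Short_All",
   "Other_Rept_Positions_Spread_All",
   "Tot_Rept_Positions_Long_All",
   "Tot_Rept_Positions_Short_All",
   "NonRept_Positions_Long_All",
   "NonRept_Positions_Short_All"]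

def disagg_schema_py_alt (ncols : Int) : List String :=
  let cols := if ncols ≥ 0 then PySem.List.slice pvNames none (some ncols) else []
  cols ++ (PySem.List.pyRange ((pvNames.length : Int) + 1) (ncols + 1) 1).map
            (fun i => "col_" ++ pvFmt3 i)

-- ===== PRECONDITION & SPEC =====
def Spec_disagg_schema_py (ncols : Int) (out : List String) : Prop := out = disagg_schema_py_alt ncols
instance (ncols : Int) (out : List String) : Decidable (Spec_disagg_schema_py ncols out) := by unfold Spec_disagg_schema_py; infer_instance

-- ===== CLAIM (what is proved, stated in full; the proofs are below) =====
def Claim_equal_disagg_schema_py : Prop := ∀ (ncols : Int), Dom_disagg_schema_py ncols → Spec_disagg_schema_py ncols (disagg_schema_py ncols)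

-- ===== LEMMAS AND PROOFS =====

-- A's overwrite loop does nothing when ncols ≤ 0 (every guard idx < ncols is false)
lemma pv_foldl_noset (ncols : Int) (h : ncols ≤ 0) (items : List (Int × String))
    (hn : ∀ p ∈ items, 0 ≤ p.1) (cs : List String) :
    items.foldl (fun cs p => if p.1 < ncols then cs.set p.1.toNat p.2 else cs) cs = cs := by
  induction items generalizing cs with
  | nil => rfl
  | cons a t ih =>
      have ha : ¬ (a.1 < ncols) := by have := hn a (by simp); omega
      simp only [List.foldl_cons, if_neg ha]
      exact ih (fun p hp => hn p (by simp [hp])) cs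

set_option maxHeartbeats 2000000 in
-- overwriting positions 0..22 of a list of length ≥ 23 with the fixed names yields pvNames ++ tail
lemma pv_set23 (xs : List String) (h : 23 ≤ xs.length) :
    (((((((((((((((((((((((xs.set 0 "Market_and_Exchange_Names").set 1 "As_of_Date_In_Form_YYMMDD").set 2 "As_of_Date_Form_YYYY-MM-DD").set 3 "CFTC_Contract_Market_Code").set 4 "CFTC_Market_Code").set 5 "CFTC_Region_Code").set 6 "CFTC_Commodity_Code").set 7 "Open_Interest_All").set 8 "Prod_Merc_Positions_Long_All").set 9 "Prod_Merc_Positions_Short_All").set 10 "Swap_Positions_Long_All").set 11 "Swap_Positions_Short_All").set 12 "Swap_Positions_Spread_All").set 13 "M_Money_Positions_Long_All").set 14 "M_Money_Positions_Short_All").set 15 "M_Money_Positions_Spread_All").set 16 "Other_Rept_Positions_Long_All").set 17 "Other_Rept_Positions_Short_All").set 18 "Other_Rept_Positions_Spread_All").set 19 "Tot_Rept_Positions_Long_All").set 20 "Tot_Rept_Positions_Short_All").set 21 "NonRept_Positions_Long_All").set 22 "NonRept_Positions_Short_All") = pvNames ++ xs.drop 23 := by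
  obtain ⟨a0, xs, rfl⟩ : ∃ y ys, xs = y :: ys := by
    cases xs with
    | nil => exact absurd h (by norm_num)
    | cons y ys => exact ⟨y, ys, rfl⟩
  obtain ⟨a1, xs, rfl⟩ : ∃ y ys, xs = y :: ys := by
    cases xs with
    | nil => exact absurd h (by norm_num)
    | cons y ys => exact ⟨y, ys, rfl⟩
  obtain ⟨a2, xs, rfl⟩ : ∃ y ys, xs = y :: ys := by
    cases xs with
    | nil => exact absurd h (by norm_num)
    | cons y ys => exact ⟨y, ys, rfl⟩
  obtain ⟨a3, xs, rfl⟩ : ∃ y ys, xs = y :: ys := by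
    cases xs with
    | nil => exact absurd h (by norm_num)
    | cons y ys => exact ⟨y, ys, rfl⟩
  obtain ⟨a4, xs, rfl⟩ : ∃ y ys, xs = y :: ys := by
    cases xs with
    | nil => exact absurd h (by norm_num)
    | cons y ys => exact ⟨y, ys, rfl⟩
  obtain ⟨a5, xs, rfl⟩ : ∃ y ys, xs = y :: ys := by
    cases xs with
    | nil => exact absurd h (by norm_num)
    | cons y ys => exact ⟨y, ys, rfl⟩
  obtain ⟨a6, xs, rfl⟩ : ∃ y ys, xs = y :: ys := by
    cases xs with
    | nil => exact absurd h (by norm_num)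
    | cons y ys => exact ⟨y, ys, rfl⟩
  obtain ⟨a7, xs, rfl⟩ : ∃ y ys, xs = y :: ys := by
    cases xs with
    | nil => exact absurd h (by norm_num)
    | cons y ys => exact ⟨y, ys, rfl⟩
  obtain ⟨a8, xs, rfl⟩ : ∃ y ys, xs = y :: ys := by
    cases xs with
    | nil => exact absurd h (by norm_num)
    | cons y ys => exact ⟨y, ys, rfl⟩
  obtain ⟨a9, xs, rfl⟩ : ∃ y ys, xs = y :: ys := by
    cases xs with
    | nil => exact absurd h (by norm_num)
    | cons y ys => exact ⟨y, ys, rfl⟩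
  obtain ⟨a10, xs, rfl⟩ : ∃ y ys, xs = y :: ys := by
    cases xs with
    | nil => exact absurd h (by norm_num)
    | cons y ys => exact ⟨y, ys, rfl⟩
  obtain ⟨a11, xs, rfl⟩ : ∃ y ys, xs = y :: ys := by
    cases xs with
    | nil => exact absurd h (by norm_num)
    | cons y ys => exact ⟨y, ys, rfl⟩
  obtain ⟨a12, xs, rfl⟩ : ∃ y ys, xs = y :: ys := by
    cases xs with
    | nil => exact absurd h (by norm_num)
    | cons y ys => exact ⟨y, ys, rfl⟩
  obtain ⟨a13, xs, rfl⟩ : ∃ y ys, xs = y :: ys := by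
    cases xs with
    | nil => exact absurd h (by norm_num)
    | cons y ys => exact ⟨y, ys, rfl⟩
  obtain ⟨a14, xs, rfl⟩ : ∃ y ys, xs = y :: ys := by
    cases xs with
    | nil => exact absurd h (by norm_num)
    | cons y ys => exact ⟨y, ys, rfl⟩
  obtain ⟨a15, xs, rfl⟩ : ∃ y ys, xs = y :: ys := by
    cases xs with
    | nil => exact absurd h (by norm_num)
    | cons y ys => exact ⟨y, ys, rfl⟩
  obtain ⟨a16, xs, rfl⟩ : ∃ y ys, xs = y :: ys := by
    cases xs with
    | nil => exact absurd h (by norm_num)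
    | cons y ys => exact ⟨y, ys, rfl⟩
  obtain ⟨a17, xs, rfl⟩ : ∃ y ys, xs = y :: ys := by
    cases xs with
    | nil => exact absurd h (by norm_num)
    | cons y ys => exact ⟨y, ys, rfl⟩
  obtain ⟨a18, xs, rfl⟩ : ∃ y ys, xs = y :: ys := by
    cases xs with
    | nil => exact absurd h (by norm_num)
    | cons y ys => exact ⟨y, ys, rfl⟩
  obtain ⟨a19, xs, rfl⟩ : ∃ y ys, xs = y :: ys := by
    cases xs with
    | nil => exact absurd h (by norm_num)
    | cons y ys => exact ⟨y, ys, rfl⟩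
  obtain ⟨a20, xs, rfl⟩ : ∃ y ys, xs = y :: ys := by
    cases xs with
    | nil => exact absurd h (by norm_num)
    | cons y ys => exact ⟨y, ys, rfl⟩
  obtain ⟨a21, xs, rfl⟩ : ∃ y ys, xs = y :: ys := by
    cases xs with
    | nil => exact absurd h (by norm_num)
    | cons y ys => exact ⟨y, ys, rfl⟩
  obtain ⟨a22, xs, rfl⟩ : ∃ y ys, xs = y :: ys := by
    cases xs with
    | nil => exact absurd h (by norm_num)
    | cons y ys => exact ⟨y, ys, rfl⟩
  simp only [List.set_cons_succ, List.set_cons_zero, List.drop_succ_cons, List.drop_zero]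
  rfl

set_option maxHeartbeats 2000000 in
lemma pv_main (ncols : Int) : disagg_schema_py ncols = disagg_schema_py_alt ncols := by
  by_cases h0 : ncols ≤ 0
  · -- ncols ≤ 0: both sides are []
    simp only [disagg_schema_py, disagg_schema_py_alt]
    rw [PySem.List.pyRange_one_eq_nil (by omega), PySem.List.pyRange_one_eq_nil (by omega)]
    simp only [List.map_nil, List.append_nil]
    rw [pv_foldl_noset ncols h0 _ (by intro p hp; fin_cases hp <;> norm_num) []]
    split
    · next h =>
        have hz : ncols = 0 := le_antisymm h0 h
        subst hz
        rfl
    · rfl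
  · by_cases h23 : ncols < 23
    · -- 1 ≤ ncols ≤ 22: finitely many cases
      have h1 : 1 ≤ ncols := by omega
      interval_cases ncols <;> decide
    · -- ncols ≥ 23: general case
      have hge : (23:Int) ≤ ncols := by omega
      have hh0 : ((0:Int)) < ncols := by omega
      have hh1 : ((1:Int)) < ncols := by omega
      have hh2 : ((2:Int)) < ncols := by omega
      have hh3 : ((3:Int)) < ncols := by omega
      have hh4 : ((4:Int)) < ncols := by omega
      have hh5 : ((5:Int)) < ncols := by omega
      have hh6 : ((6:Int)) < ncols := by omega
      have hh7 : ((7:Int)) < ncols := by omega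
      have hh8 : ((8:Int)) < ncols := by omega
      have hh9 : ((9:Int)) < ncols := by omega
      have hh10 : ((10:Int)) < ncols := by omega
      have hh11 : ((11:Int)) < ncols := by omega
      have hh12 : ((12:Int)) < ncols := by omega
      have hh13 : ((13:Int)) < ncols := by omega
      have hh14 : ((14:Int)) < ncols := by omega
      have hh15 : ((15:Int)) < ncols := by omega
      have hh16 : ((16:Int)) < ncols := by omega
      have hh17 : ((17:Int)) < ncols := by omega
      have hh18 : ((18:Int)) < ncols := by omega
      have hh19 : ((19:Int)) < ncols := by omega
      have hh20 : ((20:Int)) < ncols := by omega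
      have hh21 : ((21:Int)) < ncols := by omega
      have hh22 : ((22:Int)) < ncols := by omega
      simp only [disagg_schema_py, disagg_schema_py_alt, List.foldl_cons, List.foldl_nil,
        if_pos hh0, if_pos hh1, if_pos hh2, if_pos hh3, if_pos hh4, if_pos hh5, if_pos hh6, if_pos hh7, if_pos hh8, if_pos hh9, if_pos hh10, if_pos hh11, if_pos hh12, if_pos hh13, if_pos hh14, if_pos hh15, if_pos hh16, if_pos hh17, if_pos hh18, if_pos hh19, if_pos hh20, if_pos hh21, if_pos hh22]
      rw [if_pos (by omega), PySem.List.slice_to pvNames (show (0:Int) ≤ ncols by omega),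
          List.take_of_length_le (by simp [pvNames]; omega)]
      have hlen : ((pvNames.length : Int)) = 23 := by simp [pvNames]
      rw [hlen]
      have e0 : (Int.toNat 0) = 0 := by simp
      have e1 : (Int.toNat 1) = 1 := by simp
      have e2 : (Int.toNat 2) = 2 := by simp
      have e3 : (Int.toNat 3) = 3 := by simp
      have e4 : (Int.toNat 4) = 4 := by simp
      have e5 : (Int.toNat 5) = 5 := by simp
      have e6 : (Int.toNat 6) = 6 := by simp
      have e7 : (Int.toNat 7) = 7 := by simp
      have e8 : (Int.toNat 8) = 8 := by simp
      have e9 : (Int.toNat 9) = 9 := by simp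
      have e10 : (Int.toNat 10) = 10 := by simp
      have e11 : (Int.toNat 11) = 11 := by simp
      have e12 : (Int.toNat 12) = 12 := by simp
      have e13 : (Int.toNat 13) = 13 := by simp
      have e14 : (Int.toNat 14) = 14 := by simp
      have e15 : (Int.toNat 15) = 15 := by simp
      have e16 : (Int.toNat 16) = 16 := by simp
      have e17 : (Int.toNat 17) = 17 := by simp
      have e18 : (Int.toNat 18) = 18 := by simp
      have e19 : (Int.toNat 19) = 19 := by simp
      have e20 : (Int.toNat 20) = 20 := by simp
      have e21 : (Int.toNat 21) = 21 := by simp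
      have e22 : (Int.toNat 22) = 22 := by simp
      simp only [e0, e1, e2, e3, e4, e5, e6, e7, e8, e9, e10, e11, e12, e13, e14, e15, e16, e17, e18, e19, e20, e21, e22]
      rw [pv_set23 _ (by
        simp only [List.length_map, PySem.List.length_pyRange_one]; omega)]
      congr 1
      rw [← List.map_drop]
      congr 1
      have hsplit := PySem.List.pyRange_one_append 1 24 (ncols + 1) (by omega) (by omega)
      rw [hsplit]
      have hl : (PySem.List.pyRange 1 24 1).length = 23 := by
        rw [PySem.List.length_pyRange_one]; rfl
      rw [← hl, List.drop_left]
      norm_num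

-- ===== VERDICT (by name: the statement is the Claim_ definition above) =====
theorem disagg_schema_py_spec : Claim_equal_disagg_schema_py := by
  intro ncols _
  exact pv_main ncols
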